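-- pv_equiv track=rewrite | github.com/yelhousni/map-to-curve-gmmz | karatsuba_deferred.py | add_chunks_5x5
-- ===== SOURCE A (Python) =====
-- CHUNK_BITS = 32
--
-- NUM_CHUNKS = 8
--
-- BASE = 1 << CHUNK_BITS
--
-- def add_chunks_5x5(a, b):
--     """Add two 5-limb numbers (lists length 5), return 8-limb result (pad zeros)."""
--     M2 = NUM_CHUNKS // 2 + 1  # 5
--     res = [0] * NUM_CHUNKS
--     carry = 0
--     for i in range(M2):
--         s = a[i] + b[i] + carry
--         res[i] = s & (BASE - 1)
--         carry = s >> CHUNK_BITS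
--     # carry goes into limb 5
--     res[M2] = carry
--     return res
-- ===== SOURCE B (Python) =====
-- CHUNK_BITS = 32
-- NUM_CHUNKS = 8
-- BASE = 1 << CHUNK_BITS
--
-- def add_chunks_5x5(a, b):
--     """Add two 5-limb numbers (lists length 5), return 8-limb result (pad zeros)."""
--     S = sum(a[i] << (CHUNK_BITS * i) for i in range(5)) \
--       + sum(b[i] << (CHUNK_BITS * i) for i in range(5))
--     res = [(S >> (CHUNK_BITS * i)) & (BASE - 1) for i in range(5)]
--     res.append(S >> (CHUNK_BITS * 5))
--     res += [0, 0]
--     return res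
-- ===== Notes on version B (the rewrite author's own statement) =====
-- stated objective: alternative
-- what changed: Replaces the per-limb carry-propagation loop by assembling both inputs into one big integer, adding them, and extracting the 8 output limbs by shift/mask (limb 5 unmasked trailing carry, limbs 6-7 zero, as A produces).
import Mathlib
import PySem

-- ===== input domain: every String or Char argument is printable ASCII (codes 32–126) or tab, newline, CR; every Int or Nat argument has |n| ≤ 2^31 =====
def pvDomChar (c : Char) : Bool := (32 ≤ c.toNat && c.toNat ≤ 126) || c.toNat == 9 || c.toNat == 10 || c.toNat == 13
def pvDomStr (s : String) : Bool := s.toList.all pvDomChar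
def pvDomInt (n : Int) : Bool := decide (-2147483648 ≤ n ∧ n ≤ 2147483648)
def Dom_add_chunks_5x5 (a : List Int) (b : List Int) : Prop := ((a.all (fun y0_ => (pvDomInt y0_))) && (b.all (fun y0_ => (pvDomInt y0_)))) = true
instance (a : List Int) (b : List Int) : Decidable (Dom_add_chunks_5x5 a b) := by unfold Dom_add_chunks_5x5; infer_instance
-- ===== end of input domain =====

-- B assembles both inputs into one big integer and extracts the limbs by shift/mask,
-- instead of A's per-limb carry loop.  Equivalence on lists of length ≥ 5.

-- ===== PORT A =====
-- Literal port of A: loop i = 0..4 over (res, carry); 's & (BASE-1)' is ported as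
-- PySem.Int.mod s BASE and 's >> 32' as PySem.Int.floordiv s BASE, which are exact
-- for the power-of-two modulus 2^32 on all Python ints (including negatives).
def add_chunks_5x5 (a : List Int) (b : List Int) : List Int :=
  let M2 : Int := PySem.Int.floordiv 8 2 + 1
  let res : List Int := List.replicate 8 0
  let st := (PySem.List.pyRange 0 M2 1).foldl
    (fun (st : List Int × Int) i =>
      let s := (PySem.List.pyGet? a i).getD 0 + (PySem.List.pyGet? b i).getD 0 + st.2
      (st.1.set i.toNat (PySem.Int.mod s 4294967296), PySem.Int.floordiv s 4294967296))
    (res, 0)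
  st.1.set M2.toNat st.2

-- ===== PORT B =====
-- Literal port of Source B: S is built by folding the two generator sums ('x << k' = x * 2^k,
-- exact for all ints); limbs 0..4 are '(S >> 32*i) & (BASE-1)' via floordiv/mod (exact for
-- the power-of-two modulus), limb 5 is the unmasked 'S >> 160', then [0, 0] is appended.
def add_chunks_5x5_alt (a : List Int) (b : List Int) : List Int :=
  let S : Int :=
    (PySem.List.pyRange 0 5 1).foldl
      (fun acc i => acc + (PySem.List.pyGet? a i).getD 0 * 2 ^ (32 * i).toNat) 0
    + (PySem.List.pyRange 0 5 1).foldl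
      (fun acc i => acc + (PySem.List.pyGet? b i).getD 0 * 2 ^ (32 * i).toNat) 0
  ((PySem.List.pyRange 0 5 1).map
      (fun i => PySem.Int.mod (PySem.Int.floordiv S (2 ^ (32 * i).toNat)) 4294967296))
    ++ [PySem.Int.floordiv S (2 ^ 160)] ++ [0, 0]

-- ===== PRECONDITION & SPEC =====
-- Pre_ excludes lists shorter than 5, on which the Python A raises IndexError.
def Pre_add_chunks_5x5 (a : List Int) (b : List Int) : Prop := 5 ≤ a.length ∧ 5 ≤ b.length
instance (a : List Int) (b : List Int) : Decidable (Pre_add_chunks_5x5 a b) := by unfold Pre_add_chunks_5x5; infer_instance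
def pvWitness_add_chunks_5x5 : List Int × List Int := ([1, 2, 3, 4, 5], [2147483648, 0, 0, 0, 1])

def Spec_add_chunks_5x5 (a : List Int) (b : List Int) (out : List Int) : Prop := out = add_chunks_5x5_alt a b
instance (a : List Int) (b : List Int) (out : List Int) : Decidable (Spec_add_chunks_5x5 a b out) := by unfold Spec_add_chunks_5x5; infer_instance

-- ===== CLAIM (what is proved, stated in full; the proofs are below) =====
def Claim_equal_add_chunks_5x5 : Prop := ∀ (a : List Int) (b : List Int), Dom_add_chunks_5x5 a b → Pre_add_chunks_5x5 a b → Spec_add_chunks_5x5 a b (add_chunks_5x5 a b)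

-- ===== LEMMAS AND PROOFS =====

-- Both ports, on a₀…a₄ / b₀…b₄, reduce to closed arithmetic in mod/floordiv by
-- powers of two; the per-component identities are discharged by omega.
theorem add_chunks_core (a0 a1 a2 a3 a4 b0 b1 b2 b3 b4 : Int)
    (ar br : List Int) :
    add_chunks_5x5 (a0 :: a1 :: a2 :: a3 :: a4 :: ar) (b0 :: b1 :: b2 :: b3 :: b4 :: br)
      = add_chunks_5x5_alt (a0 :: a1 :: a2 :: a3 :: a4 :: ar) (b0 :: b1 :: b2 :: b3 :: b4 :: br) := by
  have hm : ∀ x : Int, PySem.Int.mod x 4294967296 = x % 4294967296 :=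
    fun x => PySem.Int.mod_eq_emod_of_pos (by norm_num)
  have hd : ∀ (x y : Int), 0 < y → PySem.Int.floordiv x y = x / y :=
    fun x y hy => PySem.Int.floordiv_eq_ediv_of_pos hy
  have g : ∀ (k : Nat) (l : List Int), PySem.List.pyGet? l (k : Int) = l[k]? :=
    fun k l => PySem.List.pyGet?_natCast l k
  have g0 : ∀ l : List Int, PySem.List.pyGet? l 0 = l[0]? := fun l => by exact_mod_cast g 0 l
  have g1 : ∀ l : List Int, PySem.List.pyGet? l 1 = l[1]? := fun l => by exact_mod_cast g 1 l
  have g2 : ∀ l : List Int, PySem.List.pyGet? l 2 = l[2]? := fun l => by exact_mod_cast g 2 l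
  have g3 : ∀ l : List Int, PySem.List.pyGet? l 3 = l[3]? := fun l => by exact_mod_cast g 3 l
  have g4 : ∀ l : List Int, PySem.List.pyGet? l 4 = l[4]? := fun l => by exact_mod_cast g 4 l
  simp only [add_chunks_5x5, add_chunks_5x5_alt]
  norm_num [show PySem.List.pyRange 0 5 1 = [0, 1, 2, 3, 4] from by decide,
    show (PySem.Int.floordiv 8 2 : Int) = 4 from by decide,
    List.foldl, List.set, List.replicate, hm, g0, g1, g2, g3, g4,
    show Int.toNat 2 = 2 from rfl, show Int.toNat 3 = 3 from rfl,
    show Int.toNat 4 = 4 from rfl, show Int.toNat 5 = 5 from rfl,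
    show Int.toNat 32 = 32 from rfl, show Int.toNat 64 = 64 from rfl,
    show Int.toNat 96 = 96 from rfl, show Int.toNat 128 = 128 from rfl,
    hd _ _ (by norm_num : (0:Int) < 4294967296),
    hd _ _ (by norm_num : (0:Int) < 2 ^ 160)]
  refine ⟨?_, ?_, ?_, ?_, ?_, ?_⟩ <;> omega

-- ===== VERDICT (by name: the statement is the Claim_ definition above) =====
theorem add_chunks_5x5_spec : Claim_equal_add_chunks_5x5 := by
  intro a b _ hpre
  unfold Spec_add_chunks_5x5
  obtain ⟨ha, hb⟩ := hpre
  match a, ha, b, hb with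
  | a0 :: a1 :: a2 :: a3 :: a4 :: ar, _, b0 :: b1 :: b2 :: b3 :: b4 :: br, _ =>
    exact add_chunks_core a0 a1 a2 a3 a4 b0 b1 b2 b3 b4 ar br
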